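-- pv_equiv track=rewrite | github.com/onursuay/yoscraper | marketing/segments.py | _apply_import_filter
-- ===== SOURCE A (Python) =====
-- def _apply_import_filter(leads: list, f: dict) -> list:
--     city      = (f.get("city") or "").strip().lower()
--     date_from = (f.get("date_from") or "").strip()
--     date_to   = (f.get("date_to") or "").strip()
--
--     result = leads
--     if city:
--         result = [l for l in result if city in l["city"].lower()]
--     if date_from:
--         result = [l for l in result if l["date"] >= date_from]
--     if date_to:
--         result = [l for l in result if l["date"] <= date_to]
--     return result
-- ===== SOURCE B (Python) =====
-- def _apply_import_filter(leads: list, f: dict) -> list: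
--     # Build the active filters as a list of predicate closures, then do one
--     # explicit accumulator pass keeping leads that satisfy every active check.
--     checks = []
--     city = (f.get("city") or "").strip().lower()
--     if city:
--         checks.append(lambda l: city in l["city"].lower())
--     date_from = (f.get("date_from") or "").strip()
--     if date_from:
--         checks.append(lambda l: l["date"] >= date_from)
--     date_to = (f.get("date_to") or "").strip()
--     if date_to:
--         checks.append(lambda l: l["date"] <= date_to)
--
--     result = []
--     for l in leads:
--         if all(c(l) for c in checks):
--             result.append(l)
--     return result
-- ===== Notes on version B (the rewrite author's own statement) =====
-- stated objective: alternative
-- what changed: B represents the active filters as data (a list of predicate closures built once from f) and makes a single explicit accumulator pass keeping each lead iff all checks pass, instead of A's up-to-three sequential conditional list-rebuilding passes.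
import Mathlib
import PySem

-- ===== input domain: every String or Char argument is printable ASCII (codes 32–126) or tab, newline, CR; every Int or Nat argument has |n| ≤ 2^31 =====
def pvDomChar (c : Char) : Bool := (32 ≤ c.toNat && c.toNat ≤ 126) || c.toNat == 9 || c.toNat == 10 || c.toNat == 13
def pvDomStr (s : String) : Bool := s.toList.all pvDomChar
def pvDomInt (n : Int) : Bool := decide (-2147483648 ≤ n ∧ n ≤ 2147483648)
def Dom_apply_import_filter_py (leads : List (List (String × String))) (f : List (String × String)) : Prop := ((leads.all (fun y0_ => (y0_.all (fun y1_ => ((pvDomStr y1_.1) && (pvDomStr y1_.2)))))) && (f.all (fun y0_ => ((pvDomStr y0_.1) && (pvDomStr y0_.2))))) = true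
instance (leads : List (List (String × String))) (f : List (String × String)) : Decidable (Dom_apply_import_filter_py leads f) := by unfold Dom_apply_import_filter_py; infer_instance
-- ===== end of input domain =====

-- B builds the active filters once as a list of predicate closures and makes one explicit
-- accumulator pass over leads, instead of A's up-to-three sequential list-rebuilding passes
-- (objective: alternative decomposition, same O(n) cost).

-- ===== PORT A =====
-- A: three conditional passes, each rebuilding the list.
def apply_import_filter_py (leads : List (List (String × String))) (f : List (String × String)) : List (List (String × String)) :=
  let city := PySem.Str.lower (PySem.Str.strip (((PySem.Dict.mk f).get? "city").getD ""))
  let date_from := PySem.Str.strip (((PySem.Dict.mk f).get? "date_from").getD "")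
  let date_to := PySem.Str.strip (((PySem.Dict.mk f).get? "date_to").getD "")
  let result := leads
  let result := if city ≠ "" then
    result.filter (fun l => PySem.Str.isIn city (PySem.Str.lower (((PySem.Dict.mk l).get? "city").getD "")))
  else result
  let result := if date_from ≠ "" then
    result.filter (fun l => decide (date_from.toList ≤ (((PySem.Dict.mk l).get? "date").getD "").toList))
  else result
  let result := if date_to ≠ "" then
    result.filter (fun l => decide ((((PySem.Dict.mk l).get? "date").getD "").toList ≤ date_to.toList))
  else result
  result

-- ===== PORT B =====
-- B: active filters collected as a list of closures, then one accumulator pass.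
def apply_import_filter_py_alt (leads : List (List (String × String))) (f : List (String × String)) : List (List (String × String)) :=
  let checks : List (List (String × String) → Bool) := []
  let city := PySem.Str.lower (PySem.Str.strip (((PySem.Dict.mk f).get? "city").getD ""))
  let checks := if city ≠ "" then
    checks ++ [fun l => PySem.Str.isIn city (PySem.Str.lower (((PySem.Dict.mk l).get? "city").getD ""))]
  else checks
  let date_from := PySem.Str.strip (((PySem.Dict.mk f).get? "date_from").getD "")
  let checks := if date_from ≠ "" then
    checks ++ [fun l => decide (date_from.toList ≤ (((PySem.Dict.mk l).get? "date").getD "").toList)]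
  else checks
  let date_to := PySem.Str.strip (((PySem.Dict.mk f).get? "date_to").getD "")
  let checks := if date_to ≠ "" then
    checks ++ [fun l => decide ((((PySem.Dict.mk l).get? "date").getD "").toList ≤ date_to.toList)]
  else checks
  leads.foldl (fun acc l => if checks.all (fun c => c l) then acc ++ [l] else acc) []

-- ===== PRECONDITION & SPEC =====
-- Pre_ excludes exactly the inputs where Python A raises KeyError: a lead missing the "city"
-- key while the city filter is active, or a lead reaching an active date filter (i.e. passing
-- the city filter, or no city filter) while missing the "date" key.
def Pre_apply_import_filter_py (leads : List (List (String × String))) (f : List (String × String)) : Prop :=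
  let city := PySem.Str.lower (PySem.Str.strip (((PySem.Dict.mk f).get? "city").getD ""))
  let date_from := PySem.Str.strip (((PySem.Dict.mk f).get? "date_from").getD "")
  let date_to := PySem.Str.strip (((PySem.Dict.mk f).get? "date_to").getD "")
  (∀ l ∈ leads, city ≠ "" → ((PySem.Dict.mk l).get? "city").isSome = true) ∧
  (∀ l ∈ leads, (date_from ≠ "" ∨ date_to ≠ "") →
    (city = "" ∨ PySem.Str.isIn city (PySem.Str.lower (((PySem.Dict.mk l).get? "city").getD "")) = true) →
    ((PySem.Dict.mk l).get? "date").isSome = true)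
instance (leads : List (List (String × String))) (f : List (String × String)) : Decidable (Pre_apply_import_filter_py leads f) := by unfold Pre_apply_import_filter_py; infer_instance

def pvWitness_apply_import_filter_py : (List (List (String × String))) × (List (String × String)) :=
  ([[("city", "Ankara"), ("date", "2024-01-02")], [("city", "Izmir"), ("date", "2024-02-01")]],
   [("city", " AN "), ("date_from", "2024-01-01"), ("date_to", "2024-12-31")])

def Spec_apply_import_filter_py (leads : List (List (String × String))) (f : List (String × String)) (out : List (List (String × String))) : Prop := out = apply_import_filter_py_alt leads f
instance (leads : List (List (String × String))) (f : List (String × String)) (out : List (List (String × String))) : Decidable (Spec_apply_import_filter_py leads f out) := by unfold Spec_apply_import_filter_py; infer_instance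

-- ===== CLAIM (what is proved, stated in full; the proofs are below) =====
def Claim_equal_apply_import_filter_py : Prop := ∀ (leads : List (List (String × String))) (f : List (String × String)), Dom_apply_import_filter_py leads f → Pre_apply_import_filter_py leads f → Spec_apply_import_filter_py leads f (apply_import_filter_py leads f)

-- ===== LEMMAS AND PROOFS =====
theorem pv_flatten_map_singleton {α : Type} (l : List α) :
    (List.map (fun x => [x]) l).flatten = l := by
  induction l with
  | nil => rfl
  | cons a t ih => simp [ih]

-- ===== VERDICT (by name: the statement is the Claim_ definition above) =====
theorem apply_import_filter_py_spec : Claim_equal_apply_import_filter_py := by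
  intro leads f _ _
  unfold Spec_apply_import_filter_py
  simp only [apply_import_filter_py, apply_import_filter_py_alt]
  by_cases h1 : PySem.Str.lower (PySem.Str.strip (((PySem.Dict.mk f).get? "city").getD "")) = "" <;>
  by_cases h2 : PySem.Str.strip (((PySem.Dict.mk f).get? "date_from").getD "") = "" <;>
  by_cases h3 : PySem.Str.strip (((PySem.Dict.mk f).get? "date_to").getD "") = "" <;>
  simp [h1, h2, h3, PySem.List.foldl_append_if_eq_filter, PySem.List.foldl_append_ite_eq_filter,
      List.filter_filter, decide_eq_true_eq, Bool.and_comm, Bool.and_assoc];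
  exact (pv_flatten_map_singleton leads).symm
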